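-- pv_equiv track=rewrite | github.com/Arces6/simulateur-basket-ffbb | app.py | departager
-- ===== SOURCE A (Python) =====
-- def departager(groupe, pts_cd, diff_cd, marques_cd, stats_dict):
--     if len(groupe) == 1:
--         return groupe
--
--     pts_mini     = {eq: sum(pts_cd[eq][adv]
--                             for adv in groupe if adv != eq)
--                     for eq in groupe}
--     diff_mini    = {eq: sum(diff_cd[eq][adv]
--                             for adv in groupe if adv != eq)
--                     for eq in groupe}
--     marques_mini = {eq: sum(marques_cd[eq][adv]
--                             for adv in groupe if adv != eq)
--                     for eq in groupe}
--
--     groupe_trie = sorted(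
--         groupe,
--         key=lambda e: (
--             pts_mini[e], diff_mini[e], marques_mini[e],
--             stats_dict[e]["diff"], stats_dict[e]["pts_marques"],
--         ),
--         reverse=True,
--     )
--
--     resultat_final = []
--     i = 0
--     while i < len(groupe_trie):
--         eq_ref      = groupe_trie[i]
--         sous_groupe = [eq_ref]
--         j = i + 1
--         while j < len(groupe_trie):
--             eq_j = groupe_trie[j]
--             if (pts_mini[eq_j]           == pts_mini[eq_ref]           and
--                 diff_mini[eq_j]          == diff_mini[eq_ref]          and
--                 marques_mini[eq_j]       == marques_mini[eq_ref]       and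
--                 stats_dict[eq_j]["diff"] == stats_dict[eq_ref]["diff"] and
--                 stats_dict[eq_j]["pts_marques"] ==
--                     stats_dict[eq_ref]["pts_marques"]):
--                 sous_groupe.append(eq_j)
--                 j += 1
--             else:
--                 break
--         resultat_final.extend(sorted(sous_groupe))
--         i = j
--
--     return resultat_final
-- ===== SOURCE B (Python) =====
-- def departager(groupe, pts_cd, diff_cd, marques_cd, stats_dict):
--     if len(groupe) == 1:
--         return groupe
--
--     pts_mini     = {eq: sum(pts_cd[eq][adv]
--                             for adv in groupe if adv != eq)
--                     for eq in groupe}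
--     diff_mini    = {eq: sum(diff_cd[eq][adv]
--                             for adv in groupe if adv != eq)
--                     for eq in groupe}
--     marques_mini = {eq: sum(marques_cd[eq][adv]
--                             for adv in groupe if adv != eq)
--                     for eq in groupe}
--
--     # One stable sort: descending on the five numeric criteria (negated),
--     # team name ascending as the final tie-breaker.
--     return sorted(
--         groupe,
--         key=lambda e: (
--             [-pts_mini[e], -diff_mini[e], -marques_mini[e],
--              -stats_dict[e]["diff"], -stats_dict[e]["pts_marques"]],
--             e,
--         ),
--     )
-- ===== Notes on version B (the rewrite author's own statement) =====
-- stated objective: simpler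
-- what changed: A's explicit while-loop that walks the reverse-sorted list, collects runs of equal 5-part keys and re-sorts each run by name is replaced by a single stable sorted() whose key negates the five numeric criteria and uses the team name as final ascending tie-breaker.
import Mathlib
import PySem

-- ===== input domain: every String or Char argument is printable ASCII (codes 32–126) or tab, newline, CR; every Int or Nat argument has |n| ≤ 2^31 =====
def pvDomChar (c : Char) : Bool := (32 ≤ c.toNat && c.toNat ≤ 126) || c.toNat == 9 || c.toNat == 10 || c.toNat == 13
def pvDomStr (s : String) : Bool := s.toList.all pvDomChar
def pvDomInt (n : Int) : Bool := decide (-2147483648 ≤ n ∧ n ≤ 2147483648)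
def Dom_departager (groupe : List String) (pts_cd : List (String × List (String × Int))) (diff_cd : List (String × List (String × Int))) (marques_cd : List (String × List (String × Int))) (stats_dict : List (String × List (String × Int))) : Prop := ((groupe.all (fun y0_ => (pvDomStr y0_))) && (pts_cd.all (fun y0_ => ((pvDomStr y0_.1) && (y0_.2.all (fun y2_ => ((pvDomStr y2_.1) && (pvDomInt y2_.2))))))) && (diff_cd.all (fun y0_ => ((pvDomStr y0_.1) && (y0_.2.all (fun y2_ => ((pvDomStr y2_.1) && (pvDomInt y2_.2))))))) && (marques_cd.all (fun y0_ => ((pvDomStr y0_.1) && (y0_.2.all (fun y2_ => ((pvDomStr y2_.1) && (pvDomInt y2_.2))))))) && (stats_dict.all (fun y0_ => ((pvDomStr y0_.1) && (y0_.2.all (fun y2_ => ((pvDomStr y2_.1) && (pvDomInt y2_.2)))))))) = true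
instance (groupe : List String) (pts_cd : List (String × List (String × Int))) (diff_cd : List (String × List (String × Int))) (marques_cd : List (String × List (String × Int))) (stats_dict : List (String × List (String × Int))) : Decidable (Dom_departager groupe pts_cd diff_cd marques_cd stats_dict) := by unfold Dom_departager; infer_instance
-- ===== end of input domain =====

-- B replaces A's post-sort block-grouping while-loop by a single stable sort whose key
-- negates the five numeric criteria and appends the team name as final ascending
-- tie-breaker (objective: simpler; same asymptotic cost).

-- ===== PORT A =====

-- pts_cd[eq][adv] (inner lookup; total form, used only under Pre_departager)
def pvGetI (d : List (String × Int)) (k : String) : Int := (PySem.Dict.mk d).getD k 0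
-- pts_cd[eq] (outer lookup; total form, used only under Pre_departager)
def pvGetL (d : List (String × List (String × Int))) (k : String) : List (String × Int) := (PySem.Dict.mk d).getD k []

-- {eq: sum(cd[eq][adv] for adv in groupe if adv != eq) for eq in groupe}
def pvMini (groupe : List String) (cd : List (String × List (String × Int))) : PySem.Dict String Int :=
  groupe.foldl
    (fun dd eq =>
      dd.insert eq (((groupe.filter (fun adv => adv != eq)).map (fun adv => pvGetI (pvGetL cd eq) adv)).sum))
    PySem.Dict.empty

-- the 5-component sort key (pts_mini[e], diff_mini[e], marques_mini[e], stats[e]["diff"], stats[e]["pts_marques"])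
-- as a List Int (Lean's lexicographic order on equal-length lists = Python's tuple order)
def pvKey (pm dm mm : PySem.Dict String Int) (stats : List (String × List (String × Int))) (e : String) : List Int :=
  [pm.getD e 0, dm.getD e 0, mm.getD e 0, pvGetI (pvGetL stats e) "diff", pvGetI (pvGetL stats e) "pts_marques"]

-- A's while-loop: walk the sorted list, collect the maximal run of equal keys, sort it by name, continue
def pvBlocks (key : String → List Int) : List String → List String
  | [] => []
  | x :: rest =>
      PySem.List.sorted (x :: rest.takeWhile (fun y => key y == key x)) (fun s => s) false
        ++ pvBlocks key (rest.dropWhile (fun y => key y == key x))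
termination_by l => l.length
decreasing_by
  exact Nat.lt_succ_of_le (List.length_dropWhile_le _ _)

def departager (groupe : List String) (pts_cd : List (String × List (String × Int))) (diff_cd : List (String × List (String × Int))) (marques_cd : List (String × List (String × Int))) (stats_dict : List (String × List (String × Int))) : List String :=
  if groupe.length = 1 then groupe
  else
    let pm := pvMini groupe pts_cd
    let dm := pvMini groupe diff_cd
    let mm := pvMini groupe marques_cd
    pvBlocks (pvKey pm dm mm stats_dict)
      (@PySem.List.sorted String (List Int) List.instLinearOrder.toLT List.instLinearOrder.toDecidableLT
        groupe (pvKey pm dm mm stats_dict) true)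

-- ===== PORT B =====
def departager_alt (groupe : List String) (pts_cd : List (String × List (String × Int))) (diff_cd : List (String × List (String × Int))) (marques_cd : List (String × List (String × Int))) (stats_dict : List (String × List (String × Int))) : List String :=
  if groupe.length = 1 then groupe
  else
    let pm := pvMini groupe pts_cd
    let dm := pvMini groupe diff_cd
    let mm := pvMini groupe marques_cd
    PySem.List.sorted groupe
      (fun e => toLex
        (([-(pm.getD e 0), -(dm.getD e 0), -(mm.getD e 0),
           -(pvGetI (pvGetL stats_dict e) "diff"), -(pvGetI (pvGetL stats_dict e) "pts_marques")] : List Int), e))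
      false

-- ===== PRECONDITION & SPEC =====
-- Pre_ excludes exactly the inputs on which the Python raises KeyError: with several teams,
-- every team needs its stats entry with keys "diff" and "pts_marques", and — as soon as it has
-- at least one distinct opponent in the group — its row in each of the three confrontation
-- dicts, containing every such opponent.
def Pre_departager (groupe : List String) (pts_cd : List (String × List (String × Int))) (diff_cd : List (String × List (String × Int))) (marques_cd : List (String × List (String × Int))) (stats_dict : List (String × List (String × Int))) : Prop :=
  groupe.length = 1 ∨
    (∀ e ∈ groupe,
      ((PySem.Dict.mk stats_dict).contains e = true ∧
       (PySem.Dict.mk (pvGetL stats_dict e)).contains "diff" = true ∧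
       (PySem.Dict.mk (pvGetL stats_dict e)).contains "pts_marques" = true) ∧
      ((∃ a ∈ groupe, a ≠ e) →
        ((PySem.Dict.mk pts_cd).contains e = true ∧
         (PySem.Dict.mk diff_cd).contains e = true ∧
         (PySem.Dict.mk marques_cd).contains e = true ∧
         ∀ a ∈ groupe, a ≠ e →
           ((PySem.Dict.mk (pvGetL pts_cd e)).contains a = true ∧
            (PySem.Dict.mk (pvGetL diff_cd e)).contains a = true ∧
            (PySem.Dict.mk (pvGetL marques_cd e)).contains a = true))))
instance (groupe : List String) (pts_cd : List (String × List (String × Int))) (diff_cd : List (String × List (String × Int))) (marques_cd : List (String × List (String × Int))) (stats_dict : List (String × List (String × Int))) : Decidable (Pre_departager groupe pts_cd diff_cd marques_cd stats_dict) := by unfold Pre_departager; infer_instance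

def pvWitness_departager : List String × (List (String × List (String × Int))) × (List (String × List (String × Int))) × (List (String × List (String × Int))) × (List (String × List (String × Int))) :=
  (["A", "B"],
   [("A", [("B", 2)]), ("B", [("A", 0)])],
   [("A", [("B", 3)]), ("B", [("A", -3)])],
   [("A", [("B", 50)]), ("B", [("A", 47)])],
   [("A", [("diff", 5), ("pts_marques", 60)]), ("B", [("diff", -1), ("pts_marques", 55)])])

def Spec_departager (groupe : List String) (pts_cd : List (String × List (String × Int))) (diff_cd : List (String × List (String × Int))) (marques_cd : List (String × List (String × Int))) (stats_dict : List (String × List (String × Int))) (out : List String) : Prop := out = departager_alt groupe pts_cd diff_cd marques_cd stats_dict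
instance (groupe : List String) (pts_cd : List (String × List (String × Int))) (diff_cd : List (String × List (String × Int))) (marques_cd : List (String × List (String × Int))) (stats_dict : List (String × List (String × Int))) (out : List String) : Decidable (Spec_departager groupe pts_cd diff_cd marques_cd stats_dict out) := by unfold Spec_departager; infer_instance

-- ===== CLAIM (what is proved, stated in full; the proofs are below) =====
def Claim_equal_departager : Prop := ∀ (groupe : List String) (pts_cd : List (String × List (String × Int))) (diff_cd : List (String × List (String × Int))) (marques_cd : List (String × List (String × Int))) (stats_dict : List (String × List (String × Int))), Dom_departager groupe pts_cd diff_cd marques_cd stats_dict → Pre_departager groupe pts_cd diff_cd marques_cd stats_dict → Spec_departager groupe pts_cd diff_cd marques_cd stats_dict (departager groupe pts_cd diff_cd marques_cd stats_dict)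

-- ===== LEMMAS AND PROOFS =====

theorem pvWitness_ok : Dom_departager pvWitness_departager.1 pvWitness_departager.2.1 pvWitness_departager.2.2.1 pvWitness_departager.2.2.2.1 pvWitness_departager.2.2.2.2 ∧ Pre_departager pvWitness_departager.1 pvWitness_departager.2.1 pvWitness_departager.2.2.1 pvWitness_departager.2.2.2.1 pvWitness_departager.2.2.2.2 := by
  constructor <;> decide

-- B's key, seen abstractly: the negated 5-list paired lexicographically with the name
def pvKeyB (pm dm mm : PySem.Dict String Int) (stats : List (String × List (String × Int))) (e : String) : Lex (List Int × String) :=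
  toLex ((pvKey pm dm mm stats e).map (fun n => -n), e)

theorem pvKeyB_injective (pm dm mm : PySem.Dict String Int) (stats : List (String × List (String × Int))) :
    Function.Injective (pvKeyB pm dm mm stats) := by
  intro a b h
  exact congrArg (fun p => (ofLex p).2) h

-- negating each entry of two equal-length 5-lists reverses the lexicographic order
theorem pvNeg5_lt_iff (x1 x2 x3 x4 x5 y1 y2 y3 y4 y5 : Int) :
    ([-x1, -x2, -x3, -x4, -x5] : List Int) < [-y1, -y2, -y3, -y4, -y5] ↔
      ([y1, y2, y3, y4, y5] : List Int) < [x1, x2, x3, x4, x5] := by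
  simp only [List.cons_lt_cons_iff, List.not_lt_nil, neg_lt_neg_iff, neg_inj, eq_comm]

theorem pvKeyB_le_iff (pm dm mm : PySem.Dict String Int) (stats : List (String × List (String × Int))) (a b : String) :
    pvKeyB pm dm mm stats a ≤ pvKeyB pm dm mm stats b ↔
      (pvKey pm dm mm stats b < pvKey pm dm mm stats a ∨
        (pvKey pm dm mm stats a = pvKey pm dm mm stats b ∧ a ≤ b)) := by
  unfold pvKeyB
  rw [Prod.Lex.toLex_le_toLex]
  constructor
  · rintro (h | ⟨h1, h2⟩)
    · left
      simpa only [pvKey, List.map] using (pvNeg5_lt_iff _ _ _ _ _ _ _ _ _ _).mp (by simpa [pvKey] using h)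
    · right
      exact ⟨List.map_injective_iff.mpr neg_injective h1, h2⟩
  · rintro (h | ⟨h1, h2⟩)
    · left
      simpa only [pvKey, List.map] using (pvNeg5_lt_iff _ _ _ _ _ _ _ _ _ _).mpr (by simpa [pvKey] using h)
    · right
      exact ⟨by rw [h1], h2⟩

theorem pvBlocks_perm (key : String → List Int) (l : List String) : (pvBlocks key l).Perm l := by
  induction l using pvBlocks.induct key with
  | case1 => simp [pvBlocks]
  | case2 x rest ih =>
      rw [pvBlocks]
      calc (PySem.List.sorted (x :: rest.takeWhile (fun y => key y == key x)) (fun s => s) false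
              ++ pvBlocks key (rest.dropWhile (fun y => key y == key x))).Perm
            ((x :: rest.takeWhile (fun y => key y == key x))
              ++ rest.dropWhile (fun y => key y == key x)) :=
              (PySem.List.sorted_perm _ _ _).append ih
        _ = x :: (rest.takeWhile (fun y => key y == key x) ++ rest.dropWhile (fun y => key y == key x)) := rfl
        _ = x :: rest := by rw [List.takeWhile_append_dropWhile]

-- on a key-descending list, everything the takeWhile does not swallow has a strictly smaller key
theorem pvDropWhile_key_lt {α κ : Type} [LinearOrder κ] [BEq κ] [LawfulBEq κ] (key : α → κ) (x : α) :
    ∀ rest : List α, (x :: rest).Pairwise (fun a b => key b ≤ key a) →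
      ∀ y ∈ rest.dropWhile (fun y => key y == key x), key y < key x := by
  intro rest
  induction rest with
  | nil => intro _ y hy; simp at hy
  | cons r rs ih =>
      intro hp y hy
      by_cases hr : key r = key x
      · have hp' : (x :: rs).Pairwise (fun a b => key b ≤ key a) :=
          hp.sublist (by exact (List.sublist_cons_self r rs).cons_cons x)
        rw [List.dropWhile_cons, if_pos (by simpa using hr)] at hy
        exact ih hp' y hy
      · rw [List.dropWhile_cons, if_neg (by simpa using hr)] at hy
        have hrx : key r < key x :=
          lt_of_le_of_ne ((List.pairwise_cons.mp hp).1 r (by simp)) hr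
        rcases List.mem_cons.mp hy with rfl | hy'
        · exact hrx
        · have : key y ≤ key r :=
            (List.pairwise_cons.mp (hp.sublist (List.sublist_cons_self x _))).1 y hy'
          exact lt_of_le_of_lt this hrx

theorem pvBlocks_pairwise {κ : Type} [LinearOrder κ] (kb : String → κ)
    (key : String → List Int)
    (hab : ∀ a b : String, (key b < key a ∨ (key a = key b ∧ a ≤ b)) → kb a ≤ kb b) :
    ∀ l : List String, l.Pairwise (fun a b => key b ≤ key a) →
      (pvBlocks key l).Pairwise (fun a b => kb a ≤ kb b) := by
  intro l
  induction l using pvBlocks.induct key with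
  | case1 => intro _; simp [pvBlocks]
  | case2 x rest ih =>
      intro hp
      rw [pvBlocks]
      have hblockmem : ∀ y ∈ x :: rest.takeWhile (fun y => key y == key x), key y = key x := by
        intro y hy
        rcases List.mem_cons.mp hy with rfl | hy'
        · rfl
        · simpa using List.mem_takeWhile_imp hy'
      have hdw : ∀ y ∈ rest.dropWhile (fun y => key y == key x), key y < key x :=
        pvDropWhile_key_lt key x rest hp
      rw [List.pairwise_append]
      refine ⟨?_, ?_, ?_⟩
      · -- inside the block: equal keys, names ascending
        refine (PySem.List.sorted_pairwise (x :: rest.takeWhile (fun y => key y == key x)) (fun s => s)).imp_of_mem ?_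
        intro a b ha hb hle
        have ha' := (PySem.List.mem_sorted _ _ _ a).mp ha
        have hb' := (PySem.List.mem_sorted _ _ _ b).mp hb
        exact hab a b (Or.inr ⟨(hblockmem a ha').trans (hblockmem b hb').symm, hle⟩)
      · -- the recursive tail
        refine ih ?_
        exact hp.sublist ((List.dropWhile_sublist _).cons _)
      · -- block elements before tail elements: strictly larger key
        intro a ha b hb
        have ha' := (PySem.List.mem_sorted _ _ _ a).mp ha
        have hb' : b ∈ rest.dropWhile (fun y => key y == key x) :=
          (pvBlocks_perm key _).mem_iff.mp hb
        exact hab a b (Or.inl ((hdw b hb').trans_eq (hblockmem a ha').symm))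

-- ===== VERDICT (by name: the statement is the Claim_ definition above) =====
theorem departager_spec : Claim_equal_departager := by
  intro groupe pts_cd diff_cd marques_cd stats_dict _ _
  unfold Spec_departager departager departager_alt
  by_cases h1 : groupe.length = 1
  · simp [h1]
  · rw [if_neg h1, if_neg h1]
    set pm := pvMini groupe pts_cd
    set dm := pvMini groupe diff_cd
    set mm := pvMini groupe marques_cd
    have halt :
        PySem.List.sorted groupe
          (fun e => toLex
            (([-(pm.getD e 0), -(dm.getD e 0), -(mm.getD e 0),
               -(pvGetI (pvGetL stats_dict e) "diff"), -(pvGetI (pvGetL stats_dict e) "pts_marques")] : List Int), e))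
          false
        = PySem.List.sorted groupe (pvKeyB pm dm mm stats_dict) false := rfl
    rw [halt]
    apply PySem.List.eq_of_perm_of_pairwise_le_of_injective (pvKeyB pm dm mm stats_dict)
      (pvKeyB_injective pm dm mm stats_dict)
    · exact ((pvBlocks_perm _ _).trans
          (@PySem.List.sorted_perm String (List Int) List.instLinearOrder.toLT
            List.instLinearOrder.toDecidableLT groupe (pvKey pm dm mm stats_dict) true)).trans
        (PySem.List.sorted_perm groupe (pvKeyB pm dm mm stats_dict) false).symm
    · exact pvBlocks_pairwise (pvKeyB pm dm mm stats_dict) (pvKey pm dm mm stats_dict)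
        (fun a b h => (pvKeyB_le_iff pm dm mm stats_dict a b).mpr h) _
        (PySem.List.sorted_pairwise_rev groupe (pvKey pm dm mm stats_dict))
    · exact PySem.List.sorted_pairwise groupe (pvKeyB pm dm mm stats_dict)
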